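-- pv_equiv track=rewrite | github.com/Mihail-Galkin/Two.Diary | app/parse.py | get_periods
-- ===== SOURCE A (Python) =====
-- def get_periods(json, is_quarters=False):
--     """
--     Возвращает учебные периоды.
--
--     :param json: Ответ от сервера, возвращаемый get_raw_diary
--     :param is_quarters: Возвращать все периоды или только четверти
--     :return: Учебные периоды в формате [{'schoolEduPeriodGuid': '...', 'eduPeriodGuid': '...',
--         'parentEduPeriodGuid': '...', 'name': '...', 'dateBegin': '...', 'dateEnd': '...'}, ...]
--     """
--     edu_periods = json["data"]["edu_periods"]
--     if not is_quarters:
--         return edu_periods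
--     quarters = []
--     parent = None
--     for i in edu_periods:
--         if i["name"] == "По четвертям":
--             parent = i["eduPeriodGuid"]
--     for i in edu_periods:
--         if i["parentEduPeriodGuid"] == parent:
--             quarters.append(i)
--     return quarters
-- ===== SOURCE B (Python) =====
-- def get_periods(json, is_quarters=False):
--     edu_periods = json["data"]["edu_periods"]
--     if not is_quarters:
--         return edu_periods
--     groups = {}
--     parent = None
--     for i in edu_periods:
--         key = i["parentEduPeriodGuid"]
--         groups[key] = groups.get(key, []) + [i]
--         if i["name"] == "По четвертям":
--             parent = i["eduPeriodGuid"]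
--     return groups.get(parent, [])
-- ===== Notes on version B (the rewrite author's own statement) =====
-- stated objective: alternative
-- what changed: B replaces A's two sequential scans (find parent, then filter by parent) with one pass that builds a dict grouping periods by parentEduPeriodGuid while recording the parent, then returns the parent's group.
import Mathlib
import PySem

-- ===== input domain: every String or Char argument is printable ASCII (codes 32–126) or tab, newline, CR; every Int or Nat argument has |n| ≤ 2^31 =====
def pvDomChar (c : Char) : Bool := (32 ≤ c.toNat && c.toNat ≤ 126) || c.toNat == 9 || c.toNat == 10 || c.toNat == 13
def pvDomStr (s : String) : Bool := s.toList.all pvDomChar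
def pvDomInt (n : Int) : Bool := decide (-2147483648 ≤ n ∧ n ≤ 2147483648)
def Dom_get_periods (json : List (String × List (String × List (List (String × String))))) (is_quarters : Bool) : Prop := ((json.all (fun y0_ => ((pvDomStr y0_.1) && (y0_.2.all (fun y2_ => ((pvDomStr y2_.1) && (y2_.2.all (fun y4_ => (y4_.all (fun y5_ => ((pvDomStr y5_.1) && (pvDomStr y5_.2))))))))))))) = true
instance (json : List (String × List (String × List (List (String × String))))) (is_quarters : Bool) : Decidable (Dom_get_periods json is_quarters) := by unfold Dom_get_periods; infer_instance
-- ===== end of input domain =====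

-- B replaces A's two scans (find parent, then filter) with one grouping pass over the periods; equivalence on Pre_ (all needed keys present).

-- shared key lookup i[k]; Pre_ guarantees the key is present wherever the Python reads it
def pvGetS (i : List (String × String)) (k : String) : String :=
  ((PySem.Dict.mk i).get? k).getD ""

-- json["data"]["edu_periods"]; Pre_ guarantees both keys are present
def pvEduPeriods (json : List (String × List (String × List (List (String × String))))) : List (List (String × String)) :=
  (((PySem.Dict.mk json).get? "data").bind (fun d => (PySem.Dict.mk d).get? "edu_periods")).getD []

-- ===== PORT A =====
def get_periods (json : List (String × List (String × List (List (String × String))))) (is_quarters : Bool) : List (List (String × String)) :=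
  let edu_periods := pvEduPeriods json
  if !is_quarters then edu_periods
  else
    let parent : Option String :=
      edu_periods.foldl (fun parent i =>
        if pvGetS i "name" == "По четвертям" then some (pvGetS i "eduPeriodGuid") else parent) none
    let quarters : List (List (String × String)) :=
      edu_periods.foldl (fun quarters i =>
        -- i["parentEduPeriodGuid"] == parent: a string equals None only if parent is a string
        if (match parent with | some p => pvGetS i "parentEduPeriodGuid" == p | none => false)
        then quarters ++ [i] else quarters) []
    quarters

-- ===== PORT B =====
def get_periods_alt (json : List (String × List (String × List (List (String × String))))) (is_quarters : Bool) : List (List (String × String)) :=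
  let edu_periods := pvEduPeriods json
  if !is_quarters then edu_periods
  else
    let st :=
      edu_periods.foldl (fun (st : PySem.Dict String (List (List (String × String))) × Option String) i =>
        let key := pvGetS i "parentEduPeriodGuid"
        (st.1.modify key [] (fun g => g ++ [i]),
         if pvGetS i "name" == "По четвертям" then some (pvGetS i "eduPeriodGuid") else st.2))
        (PySem.Dict.empty, none)
    -- groups.get(parent, []): the dict's keys are strings, so a None parent finds nothing
    match st.2 with
    | none => []
    | some p => st.1.getD p []

-- ===== PRECONDITION & SPEC =====
-- Pre_ excludes exactly the inputs where the Python A raises KeyError: missing "data"/"edu_periods",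
-- or (when is_quarters) a period missing "name"/"parentEduPeriodGuid", or a matching period missing "eduPeriodGuid".
def Pre_get_periods (json : List (String × List (String × List (List (String × String))))) (is_quarters : Bool) : Prop :=
  (((PySem.Dict.mk json).get? "data").bind (fun d => (PySem.Dict.mk d).get? "edu_periods")).isSome = true ∧
  (is_quarters = true → ∀ i ∈ pvEduPeriods json,
    ((PySem.Dict.mk i).get? "name").isSome = true ∧
    ((PySem.Dict.mk i).get? "parentEduPeriodGuid").isSome = true ∧
    ((PySem.Dict.mk i).get? "name" = some "По четвертям" → ((PySem.Dict.mk i).get? "eduPeriodGuid").isSome = true))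
instance (json : List (String × List (String × List (List (String × String))))) (is_quarters : Bool) : Decidable (Pre_get_periods json is_quarters) := by unfold Pre_get_periods; infer_instance

def pvWitness_get_periods : (List (String × List (String × List (List (String × String))))) × Bool :=
  ([("data", [("edu_periods", [[("name", "q1"), ("eduPeriodGuid", "a"), ("parentEduPeriodGuid", "p")]])])], true)

def Spec_get_periods (json : List (String × List (String × List (List (String × String))))) (is_quarters : Bool) (out : List (List (String × String))) : Prop := out = get_periods_alt json is_quarters
instance (json : List (String × List (String × List (List (String × String))))) (is_quarters : Bool) (out : List (List (String × String))) : Decidable (Spec_get_periods json is_quarters out) := by unfold Spec_get_periods; infer_instance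

-- ===== CLAIM (what is proved, stated in full; the proofs are below) =====
def Claim_equal_get_periods : Prop := ∀ (json : List (String × List (String × List (List (String × String))))) (is_quarters : Bool), Dom_get_periods json is_quarters → Pre_get_periods json is_quarters → Spec_get_periods json is_quarters (get_periods json is_quarters)

-- ===== LEMMAS AND PROOFS =====

-- a fold over a pair whose components do not interact is the pair of folds
theorem pvFoldPair {α β γ : Type} (l : List γ) (f : α → γ → α) (g : β → γ → β) (a : α) (b : β) :
    l.foldl (fun (s : α × β) x => (f s.1 x, g s.2 x)) (a, b) = (l.foldl f a, l.foldl g b) := by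
  induction l generalizing a b with
  | nil => rfl
  | cons x xs ih => simp [List.foldl, ih]

-- grouping pass: the group at key p is exactly the filter by key
theorem pvGroupLemma (l : List (List (String × String))) (key : List (String × String) → String)
    (d : PySem.Dict String (List (List (String × String)))) (p : String) :
    (l.foldl (fun d i => d.modify (key i) [] (fun g => g ++ [i])) d).getD p []
      = d.getD p [] ++ l.filter (fun i => key i == p) := by
  induction l generalizing d with
  | nil => simp
  | cons x xs ih =>
    simp only [List.foldl, List.filter]
    rw [ih]
    by_cases h : key x = p
    · simp [h, PySem.Dict.getD_modify_self]
    · have hb : (key x == p) = false := by simp [h]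
      rw [PySem.Dict.getD_modify]
      simp [Ne.symm h, hb]

-- A's quarters loop is a filter
theorem pvQuartersFilter (l : List (List (String × String))) (pred : List (String × String) → Bool)
    (acc : List (List (String × String))) :
    l.foldl (fun q i => if pred i then q ++ [i] else q) acc = acc ++ l.filter pred := by
  induction l generalizing acc with
  | nil => simp
  | cons x xs ih =>
    simp only [List.foldl, List.filter]
    by_cases h : pred x = true
    · simp [h, ih]
    · simp only [Bool.not_eq_true] at h
      simp [h, ih]

-- ===== VERDICT (by name: the statement is the Claim_ definition above) =====
theorem get_periods_spec : Claim_equal_get_periods := by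
  intro json is_quarters _ _
  unfold Spec_get_periods get_periods get_periods_alt
  cases is_quarters with
  | false => rfl
  | true =>
    simp only [Bool.not_true, if_neg (by decide : ¬ (false = true))]
    rw [pvFoldPair (pvEduPeriods json)
      (fun (d : PySem.Dict String (List (List (String × String)))) i =>
        d.modify (pvGetS i "parentEduPeriodGuid") [] (fun g => g ++ [i]))
      (fun (parent : Option String) i =>
        if pvGetS i "name" == "По четвертям" then some (pvGetS i "eduPeriodGuid") else parent)
      PySem.Dict.empty none]
    set eps := pvEduPeriods json with heps
    set parent := eps.foldl (fun parent i =>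
      if pvGetS i "name" == "По четвертям" then some (pvGetS i "eduPeriodGuid") else parent) none with hp
    cases parent with
    | none =>
      rw [pvQuartersFilter]
      simp
    | some p =>
      rw [pvQuartersFilter]
      simp [pvGroupLemma]
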